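-- pv_equiv track=rewrite | github.com/darkoss1/pysymex | benchmark_level4.py | level4_multiplicative_inverse
-- ===== SOURCE A (Python) =====
-- def level4_multiplicative_inverse(x: int) -> int:
--     """
--     Find multiplicative inverse modulo prime.
--     Tests modular arithmetic constraints.
--     """
--     prime = 101
--     # Find y such that (x * y) % prime == 1
--     for y in range(1, prime):
--         if (x * y) % prime == 1:
--             if y == 42:
--                 assert True, "Inverse found!"
--                 return y
--     return 0
-- ===== SOURCE B (Python) =====
-- def level4_multiplicative_inverse(x: int) -> int:
--     # The loop in A can only ever return at y == 42, i.e. exactly when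
--     # 42 is the multiplicative inverse of x mod 101; check that directly.
--     return 42 if (x * 42) % 101 == 1 else 0
-- ===== Notes on version B (the rewrite author's own statement) =====
-- stated objective: simpler
-- what changed: Replaced A's search loop over all candidate residues by a single closed-form modular check, since the loop can only ever return at the one candidate it tests for.
import Mathlib
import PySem

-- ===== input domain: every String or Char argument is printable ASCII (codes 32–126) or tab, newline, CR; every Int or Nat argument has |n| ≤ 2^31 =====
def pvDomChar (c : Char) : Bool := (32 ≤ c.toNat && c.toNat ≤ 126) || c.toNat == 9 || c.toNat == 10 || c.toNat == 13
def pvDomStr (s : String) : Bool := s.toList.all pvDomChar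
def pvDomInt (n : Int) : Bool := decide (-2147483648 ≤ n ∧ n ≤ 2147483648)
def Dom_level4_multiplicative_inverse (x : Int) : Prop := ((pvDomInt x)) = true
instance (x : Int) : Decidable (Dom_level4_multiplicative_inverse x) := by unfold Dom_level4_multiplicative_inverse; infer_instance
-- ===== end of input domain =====

-- ===== PORT A =====
-- loop body of A: for y in range(1, 101): if (x*y) % 101 == 1: if y == 42: return y; after loop: return 0
def pvLoopA (x : Int) : List Int → Int
  | [] => 0
  | y :: ys =>
    if PySem.Int.mod (x * y) 101 = 1 then
      (if y = 42 then 42 else pvLoopA x ys)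
    else pvLoopA x ys

def level4_multiplicative_inverse (x : Int) : Int :=
  pvLoopA x (PySem.List.pyRange 1 101 1)

-- ===== PORT B =====
-- B (simpler): the loop can only return at the single tested candidate, so check it directly
def level4_multiplicative_inverse_alt (x : Int) : Int :=
  if PySem.Int.mod (x * 42) 101 = 1 then 42 else 0

-- ===== PRECONDITION & SPEC =====
def Spec_level4_multiplicative_inverse (x : Int) (out : Int) : Prop := out = level4_multiplicative_inverse_alt x
instance (x : Int) (out : Int) : Decidable (Spec_level4_multiplicative_inverse x out) := by unfold Spec_level4_multiplicative_inverse; infer_instance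

-- ===== CLAIM (what is proved, stated in full; the proofs are below) =====
def Claim_equal_level4_multiplicative_inverse : Prop := ∀ (x : Int), Dom_level4_multiplicative_inverse x → Spec_level4_multiplicative_inverse x (level4_multiplicative_inverse x)

-- ===== LEMMAS AND PROOFS =====

theorem pvLoopA_eq (x : Int) (l : List Int) :
    pvLoopA x l = if PySem.Int.mod (x * 42) 101 = 1 ∧ (42 : Int) ∈ l then 42 else 0 := by
  induction l with
  | nil => simp [pvLoopA]
  | cons y ys ih =>
    simp only [pvLoopA, ih, List.mem_cons]
    by_cases hy : y = (42 : Int)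
    · subst hy
      by_cases hc : PySem.Int.mod (x * 42) 101 = 1 <;> split_ifs <;> simp_all
    · by_cases hc : PySem.Int.mod (x * y) 101 = 1 <;> split_ifs <;> simp_all

-- ===== VERDICT (by name: the statement is the Claim_ definition above) =====
theorem level4_multiplicative_inverse_spec : Claim_equal_level4_multiplicative_inverse := by
  intro x _
  unfold Spec_level4_multiplicative_inverse
  unfold level4_multiplicative_inverse level4_multiplicative_inverse_alt
  rw [pvLoopA_eq]
  have h42 : (42 : Int) ∈ PySem.List.pyRange 1 101 1 := by decide
  by_cases hc : PySem.Int.mod (x * 42) 101 = 1 <;> simp_all
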